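-- pv_equiv track=rewrite | github.com/idansherman/final_project | utils/sequence_utils.py | count_k_sequences
-- ===== SOURCE A (Python) =====
-- from collections import defaultdict
--
-- def count_k_sequences(sentences, max_k):
--     """
--     Extracts k-sequences from the given sentences and counts occurrences.
--
--     - Ensures correct counting across all sentences.
--     - No unnecessary duplicate blocking.
--     """
--     k_seq_counts = {k: defaultdict(int) for k in range(1, max_k + 1)}
--
--     for sentence in sentences:
--         for k in range(1, max_k + 1):
--             for i in range(len(sentence) - k + 1):
--                 k_seq = " ".join(sentence[i: i + k])
--                 k_seq_counts[k][k_seq] += 1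
--
--     return {k: dict(v) for k, v in k_seq_counts.items()}
-- ===== SOURCE B (Python) =====
-- def count_k_sequences(sentences, max_k):
--     """One pass per start index: grow each k-gram incrementally with a running
--     accumulator string instead of re-joining a fresh slice for every (k, i)."""
--     result = {k: {} for k in range(1, max_k + 1)}
--     if max_k >= 1:
--         for sentence in sentences:
--             n = len(sentence)
--             for i in range(n):
--                 cur = sentence[i]
--                 result[1][cur] = result[1].get(cur, 0) + 1
--                 for j in range(i + 1, min(i + max_k, n)):
--                     cur = cur + " " + sentence[j]
--                     result[j - i + 1][cur] = result[j - i + 1].get(cur, 0) + 1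
--     return result
-- ===== Notes on version B (the rewrite author's own statement) =====
-- stated objective: alternative
-- what changed: One scan over start indices per sentence that grows each k-gram with a running accumulator string (cur = cur + ' ' + word), replacing A's per-k passes that re-slice and re-join a fresh window for every (k,i).
import Mathlib
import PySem

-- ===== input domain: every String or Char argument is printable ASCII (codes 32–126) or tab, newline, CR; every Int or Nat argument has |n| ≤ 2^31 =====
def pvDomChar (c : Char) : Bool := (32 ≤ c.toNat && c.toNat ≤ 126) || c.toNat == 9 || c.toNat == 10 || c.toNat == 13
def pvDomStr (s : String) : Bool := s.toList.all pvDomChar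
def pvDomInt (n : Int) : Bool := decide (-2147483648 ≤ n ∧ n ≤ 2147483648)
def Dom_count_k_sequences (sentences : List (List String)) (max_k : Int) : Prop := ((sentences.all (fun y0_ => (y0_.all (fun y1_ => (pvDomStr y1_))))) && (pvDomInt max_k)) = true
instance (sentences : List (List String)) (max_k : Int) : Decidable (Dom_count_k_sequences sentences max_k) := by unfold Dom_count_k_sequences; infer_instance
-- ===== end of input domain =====

-- B replaces A's per-k re-slice-and-join passes by one scan over start indices that
-- grows each k-gram with a running accumulator string (objective: alternative).

-- ===== PORT A =====
def count_k_sequences (sentences : List (List String)) (max_k : Int) : List (Int × List (String × Int)) :=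
  let k_seq_counts : PySem.Dict Int (PySem.Dict String Int) :=
    (PySem.List.pyRange 1 (max_k + 1)).foldl
      (fun d k => d.insert k PySem.Dict.empty) PySem.Dict.empty
  let final : PySem.Dict Int (PySem.Dict String Int) :=
    sentences.foldl (fun acc sentence =>
      (PySem.List.pyRange 1 (max_k + 1)).foldl (fun acc k =>
        (PySem.List.pyRange 0 ((sentence.length : Int) - k + 1)).foldl (fun acc i =>
          let k_seq := PySem.Str.join " " (PySem.List.slice sentence (some i) (some (i + k)))
          acc.modify k PySem.Dict.empty (fun inner => inner.modify k_seq 0 (· + 1))) acc) acc) k_seq_counts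
  final.items.map (fun p => (p.1, p.2.items))

-- ===== PORT B =====
def count_k_sequences_alt (sentences : List (List String)) (max_k : Int) : List (Int × List (String × Int)) :=
  let result0 : PySem.Dict Int (PySem.Dict String Int) :=
    (PySem.List.pyRange 1 (max_k + 1)).foldl
      (fun d k => d.insert k PySem.Dict.empty) PySem.Dict.empty
  let result : PySem.Dict Int (PySem.Dict String Int) :=
    if max_k ≥ 1 then
      sentences.foldl (fun acc sentence =>
        let n : Int := sentence.length
        (PySem.List.pyRange 0 n).foldl (fun acc i =>
          let cur := PySem.List.pyGetD sentence i ""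
          let acc := acc.modify 1 PySem.Dict.empty (fun b => b.insert cur (b.getD cur 0 + 1))
          ((PySem.List.pyRange (i + 1) (min (i + max_k) n)).foldl
            (fun (p : String × PySem.Dict Int (PySem.Dict String Int)) j =>
              let cur := p.1 ++ " " ++ PySem.List.pyGetD sentence j ""
              (cur, p.2.modify (j - i + 1) PySem.Dict.empty
                (fun b => b.insert cur (b.getD cur 0 + 1)))) (cur, acc)).2) acc) result0
    else result0
  result.items.map (fun p => (p.1, p.2.items))

-- ===== PRECONDITION & SPEC =====
def Spec_count_k_sequences (sentences : List (List String)) (max_k : Int) (out : List (Int × List (String × Int))) : Prop := out = count_k_sequences_alt sentences max_k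
instance (sentences : List (List String)) (max_k : Int) (out : List (Int × List (String × Int))) : Decidable (Spec_count_k_sequences sentences max_k out) := by unfold Spec_count_k_sequences; infer_instance

-- ===== CLAIM (what is proved, stated in full; the proofs are below) =====
def Claim_equal_count_k_sequences : Prop := ∀ (sentences : List (List String)) (max_k : Int), Dom_count_k_sequences sentences max_k → Spec_count_k_sequences sentences max_k (count_k_sequences sentences max_k)

-- ===== LEMMAS AND PROOFS =====

-- " ".join(sentence[i:m]) — the k-gram starting at i, ending before m
def pvGram (s : List String) (i m : Int) : String :=
  PySem.Str.join " " (PySem.List.slice s (some i) (some m))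

-- one counting update "bucket p.1 gets gram p.2", parametric in the inner increment u
def pvStep (u : String → PySem.Dict String Int → PySem.Dict String Int)
    (d : PySem.Dict Int (PySem.Dict String Int)) (p : Int × String) :
    PySem.Dict Int (PySem.Dict String Int) :=
  d.modify p.1 PySem.Dict.empty (u p.2)

-- the flat update list A performs on one sentence (k-major order)
def pvLA (max_k : Int) (s : List String) : List (Int × String) :=
  (PySem.List.pyRange 1 (max_k + 1)).flatMap (fun k =>
    (PySem.List.pyRange 0 ((s.length : Int) - k + 1)).map (fun i => (k, pvGram s i (i + k))))

-- the flat update list B performs on one sentence (start-index-major order)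
def pvLB (max_k : Int) (s : List String) : List (Int × String) :=
  (PySem.List.pyRange 0 (s.length : Int)).flatMap (fun i =>
    (PySem.List.pyRange i (min (i + max_k) (s.length : Int))).map
      (fun j => (j - i + 1, pvGram s i (j + 1))))

-- the ordered list of k-grams of one sentence
def pvGrams (s : List String) (k : Int) : List String :=
  (PySem.List.pyRange 0 ((s.length : Int) - k + 1)).map (fun i => pvGram s i (i + k))

lemma pv_intercalate_append (sep c : List Char) (L : List (List Char)) (h : L ≠ []) :
    List.intercalate sep (L ++ [c]) = List.intercalate sep L ++ sep ++ c := by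
  induction L with
  | nil => exact absurd rfl h
  | cons a t ih =>
    cases t with
    | nil => simp [List.intercalate, List.intersperse]
    | cons b t' =>
      have : List.intercalate sep ((b :: t') ++ [c]) = List.intercalate sep (b :: t') ++ sep ++ c :=
        ih (by simp)
      simp only [List.cons_append]
      simp [List.intercalate] at this ⊢
      simp [this]

lemma pv_join_append (sep : String) (l : List String) (x : String) (h : l ≠ []) :
    PySem.Str.join sep (l ++ [x]) = PySem.Str.join sep l ++ sep ++ x := by
  apply String.toList_inj.mp
  simp only [PySem.Str.join, String.toList_ofList, String.toList_append, List.map_append,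
    List.map_cons, List.map_nil]
  exact pv_intercalate_append sep.toList x.toList (l.map String.toList) (by simpa using h)

lemma pv_join_single (sep : String) (x : String) : PySem.Str.join sep [x] = x := by
  apply String.toList_inj.mp
  simp [PySem.Str.join, PySem.Chars.join, List.intercalate]

lemma pv_gram_one (s : List String) (i : Int) (h0 : 0 ≤ i) (h : i < (s.length : Int)) :
    pvGram s i (i + 1) = PySem.List.pyGetD s i "" := by
  lift i to ℕ using h0 with i'
  have hlt : i' < s.length := by exact_mod_cast h
  have hcast : ((i' : Int) + 1) = ((i' + 1 : ℕ) : Int) := by push_cast; ring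
  rw [pvGram, hcast, PySem.List.slice_natCast, PySem.List.pyGetD_natCast]
  have h1 : (i' + 1 - i') = 1 := by omega
  rw [h1, List.drop_eq_getElem_cons hlt]
  rw [show List.take 1 (s[i'] :: List.drop (i' + 1) s) = [s[i']] from rfl, pv_join_single]
  exact (List.getD_eq_getElem s "" hlt).symm

lemma pv_gram_succ (s : List String) (i m : Int) (h0 : 0 ≤ i) (him : i < m)
    (hm : m < (s.length : Int)) :
    pvGram s i m ++ " " ++ PySem.List.pyGetD s m "" = pvGram s i (m + 1) := by
  have h0m : 0 ≤ m := by omega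
  rw [pvGram, pvGram]
  lift i to ℕ using h0 with i'
  lift m to ℕ using h0m with m'
  have hlt : m' < s.length := by exact_mod_cast hm
  have him' : i' < m' := by exact_mod_cast him
  have hcast : ((m' : Int) + 1) = ((m' + 1 : ℕ) : Int) := by push_cast; ring
  rw [hcast, PySem.List.slice_natCast, PySem.List.slice_natCast, PySem.List.pyGetD_natCast]
  have hidx : m' - i' < (List.drop i' s).length := by simp [List.length_drop]; omega
  have h1 : m' + 1 - i' = (m' - i') + 1 := by omega
  rw [h1, List.take_add_one]
  have hget : (List.drop i' s)[m' - i']? = some s[m'] := by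
    rw [List.getElem?_eq_getElem hidx]
    congr 1
    rw [List.getElem_drop]
    congr 1
    omega
  rw [hget, Option.toList_some]
  rw [pv_join_append _ _ _ (by
    have hlen : (List.take (m' - i') (List.drop i' s)).length = m' - i' := by
      simp [List.length_take]; omega
    intro hnil
    rw [hnil] at hlen
    simp at hlen
    omega)]
  simp [List.getD, List.getElem?_eq_getElem hlt]

-- value at key c after a fold of inserts of a constant value
lemma pv_getD_foldl_insert_const (l : List Int) (v0 : PySem.Dict String Int)
    (d : PySem.Dict Int (PySem.Dict String Int)) (c : Int) (dflt : PySem.Dict String Int) :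
    (l.foldl (fun d k => d.insert k v0) d).getD c dflt =
      if c ∈ l then v0 else d.getD c dflt := by
  induction l generalizing d with
  | nil => simp
  | cons x t ih =>
    simp only [List.foldl_cons, ih, PySem.Dict.getD_insert, List.mem_cons]
    by_cases hx : c = x <;> by_cases ht : c ∈ t <;> simp [hx, ht]

-- bucket projection: a fold of keyed updates, read at key c, is the fold of the updates at c
lemma pv_getD_foldl_step (u : String → PySem.Dict String Int → PySem.Dict String Int)
    (l : List (Int × String)) (d : PySem.Dict Int (PySem.Dict String Int)) (c : Int) :
    (l.foldl (pvStep u) d).getD c PySem.Dict.empty =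
      ((l.filter (fun p => p.1 == c)).map (·.2)).foldl (fun b g => u g b)
        (d.getD c PySem.Dict.empty) := by
  induction l generalizing d with
  | nil => simp
  | cons p t ih =>
    simp only [List.foldl_cons, ih, List.filter_cons]
    by_cases hc : p.1 = c
    · simp [hc, pvStep]
    · simp [hc, pvStep, PySem.Dict.getD_modify, Ne.symm hc]

lemma pv_update_of_subset (s : PySem.Set Int) (xs : List Int) (h : ∀ x ∈ xs, x ∈ s) :
    PySem.Set.update s xs = s := by
  rw [PySem.Set.update_eq_append_filter]
  have hf : (PySem.Set.ofList xs).filter (fun y => !s.contains y) = [] := by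
    rw [List.filter_eq_nil_iff]
    intro y hy
    have hc := (PySem.Set.contains_iff s y).mpr (h y ((PySem.Set.mem_ofList xs y).mp hy))
    simpa using hc
  rw [hf]
  simp

lemma pv_foldl_foldl_flatMap {α β γ : Type} (L : α → List β) (step : γ → β → γ)
    (l : List α) (d : γ) :
    l.foldl (fun d s => (L s).foldl step d) d = (l.flatMap L).foldl step d := by
  induction l generalizing d with
  | nil => simp
  | cons s t ih => simp [List.foldl_append, ih]

lemma pv_filter_beq_nodup (l : List Int) (t : Int) (hnd : l.Nodup) :
    l.filter (fun x => x == t) = if t ∈ l then [t] else [] := by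
  induction l with
  | nil => simp
  | cons x r ih =>
    have hnd' := (List.nodup_cons.mp hnd).2
    have hx := (List.nodup_cons.mp hnd).1
    by_cases hxt : x = t
    · subst hxt
      simp [ih hnd', hx]
    · simp [hxt, ih hnd', Ne.symm hxt]

lemma pv_flatMap_if_single {β : Type} (l : List Int) (k : Int) (F : Int → List β)
    (hnd : l.Nodup) (hk : k ∈ l) :
    (l.flatMap (fun x => if x = k then F x else [])) = F k := by
  induction l with
  | nil => simp at hk
  | cons x r ih =>
    have hnd' := (List.nodup_cons.mp hnd).1
    by_cases hxk : x = k
    · subst hxk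
      have : ∀ y ∈ r, (if y = x then F y else []) = [] := by
        intro y hy
        have : y ≠ x := fun h => hnd' (h ▸ hy)
        simp [this]
      simp [List.flatMap_cons, List.flatMap_eq_nil_iff.mpr this]
    · have hk' : k ∈ r := by cases hk with
        | head => exact absurd rfl hxk
        | tail _ h => exact h
      simp [List.flatMap_cons, hxk, ih (List.nodup_cons.mp hnd).2 hk']

-- A's nested loops on one sentence are the fold of pvLA
lemma pv_A_sentence (max_k : Int) (s : List String)
    (d : PySem.Dict Int (PySem.Dict String Int)) :
    (PySem.List.pyRange 1 (max_k + 1)).foldl (fun acc k =>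
        (PySem.List.pyRange 0 ((s.length : Int) - k + 1)).foldl (fun acc i =>
          acc.modify k PySem.Dict.empty
            (fun inner => inner.modify
              (PySem.Str.join " " (PySem.List.slice s (some i) (some (i + k)))) 0 (· + 1))) acc) d
      = (pvLA max_k s).foldl (pvStep (fun g b => b.modify g 0 (· + 1))) d := by
  rw [pvLA, ← pv_foldl_foldl_flatMap]
  apply PySem.List.foldl_congr_mem
  intro acc k _
  rw [List.foldl_map]
  rfl

-- B's incremental inner loop is the fold of the uniform update list
lemma pv_B_inner (s : List String) (i : Int) (h0 : 0 ≤ i) :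
    ∀ (m : Nat) (a b : Int), b - a = (m : Int) → i < a → b ≤ (s.length : Int) →
    ∀ (d : PySem.Dict Int (PySem.Dict String Int)),
    ((PySem.List.pyRange a b).foldl
        (fun (p : String × PySem.Dict Int (PySem.Dict String Int)) j =>
          (p.1 ++ " " ++ PySem.List.pyGetD s j "",
           p.2.modify (j - i + 1) PySem.Dict.empty
             (fun b => b.insert (p.1 ++ " " ++ PySem.List.pyGetD s j "")
               (b.getD (p.1 ++ " " ++ PySem.List.pyGetD s j "") 0 + 1))))
        (pvGram s i a, d)).2
      = (PySem.List.pyRange a b).foldl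
          (fun d j => pvStep (fun g b => b.insert g (b.getD g 0 + 1)) d (j - i + 1, pvGram s i (j + 1))) d := by
  intro m
  induction m with
  | zero =>
    intro a b hab _ _ d
    rw [PySem.List.pyRange_one_eq_nil (by omega)]
    rfl
  | succ m ih =>
    intro a b hab hia hbn d
    have hlt : a < b := by omega
    rw [PySem.List.pyRange_one_cons hlt]
    simp only [List.foldl_cons]
    have han : a < (s.length : Int) := by omega
    have hcur : pvGram s i a ++ " " ++ PySem.List.pyGetD s a "" = pvGram s i (a + 1) :=
      pv_gram_succ s i a h0 hia han
    rw [hcur]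
    have := ih (a + 1) b (by omega) (by omega) hbn
      (pvStep (fun g b => b.insert g (b.getD g 0 + 1)) d (a - i + 1, pvGram s i (a + 1)))
    simpa [pvStep] using this

-- B's loop body for one start index i is the fold of the uniform update list over [i, min(i+max_k, n))
lemma pv_B_index (max_k : Int) (s : List String) (i : Int) (hmk : 1 ≤ max_k)
    (h0 : 0 ≤ i) (hin : i < (s.length : Int))
    (acc : PySem.Dict Int (PySem.Dict String Int)) :
    (((PySem.List.pyRange (i + 1) (min (i + max_k) (s.length : Int))).foldl
        (fun (p : String × PySem.Dict Int (PySem.Dict String Int)) j =>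
          (p.1 ++ " " ++ PySem.List.pyGetD s j "",
           p.2.modify (j - i + 1) PySem.Dict.empty
             (fun b => b.insert (p.1 ++ " " ++ PySem.List.pyGetD s j "")
               (b.getD (p.1 ++ " " ++ PySem.List.pyGetD s j "") 0 + 1))))
        (PySem.List.pyGetD s i "",
         acc.modify 1 PySem.Dict.empty
           (fun b => b.insert (PySem.List.pyGetD s i "")
             (b.getD (PySem.List.pyGetD s i "") 0 + 1)))).2)
      = (PySem.List.pyRange i (min (i + max_k) (s.length : Int))).foldl
          (fun d j => pvStep (fun g b => b.insert g (b.getD g 0 + 1)) d (j - i + 1, pvGram s i (j + 1))) acc := by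
  have hib : i < min (i + max_k) (s.length : Int) := by omega
  rw [PySem.List.pyRange_one_cons hib]
  simp only [List.foldl_cons]
  have h1 : pvGram s i (i + 1) = PySem.List.pyGetD s i "" := pv_gram_one s i h0 hin
  have := pv_B_inner s i h0 (min (i + max_k) (s.length : Int) - (i + 1)).toNat
    (i + 1) (min (i + max_k) (s.length : Int)) (by omega) (by omega) (by omega)
    (pvStep (fun g b => b.insert g (b.getD g 0 + 1)) acc (i - i + 1, pvGram s i (i + 1)))
  rw [h1] at this
  simpa [pvStep, h1] using this

-- filter of the A-side update list at a key k in range: exactly the k-grams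
lemma pv_projA (max_k : Int) (s : List String) (k : Int) (h1 : 1 ≤ k) (h2 : k ≤ max_k) :
    (pvLA max_k s).filter (fun p => p.1 == k) = (pvGrams s k).map (fun g => (k, g)) := by
  rw [pvLA, List.filter_flatMap]
  have hstep : ∀ k' ∈ PySem.List.pyRange 1 (max_k + 1),
      ((PySem.List.pyRange 0 ((s.length : Int) - k' + 1)).map
          (fun i => (k', pvGram s i (i + k')))).filter (fun p => p.1 == k)
        = if k' = k then (pvGrams s k).map (fun g => (k, g)) else [] := by
    intro k' _
    rw [List.filter_map]
    by_cases hk : k' = k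
    · subst hk
      simp [Function.comp_def, pvGrams, List.map_map]
    · simp [Function.comp_def, hk]
  rw [List.flatMap_congr hstep]
  exact pv_flatMap_if_single _ k _ (PySem.List.nodup_pyRange_one _ _)
    (PySem.List.mem_pyRange_one.mpr ⟨h1, by omega⟩)

-- filter of the B-side update list at a key k in range: the same k-grams
-- a guarded flatMap over a 0-based range is a map over the truncated range
lemma pv_range_flatMap_if {β : Type} (n m : Int) (F : Int → List β) (hmn : m ≤ n) :
    (PySem.List.pyRange 0 n).flatMap (fun i => if i < m then F i else [])
      = (PySem.List.pyRange 0 m).flatMap F := by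
  by_cases h0 : 0 ≤ m
  · rw [PySem.List.pyRange_one_append 0 m n h0 hmn, List.flatMap_append]
    have hA : (PySem.List.pyRange 0 m).flatMap (fun i => if i < m then F i else [])
        = (PySem.List.pyRange 0 m).flatMap F := by
      apply List.flatMap_congr
      intro i hi
      have := PySem.List.mem_pyRange_one.mp hi
      simp [this.2]
    have hB : (PySem.List.pyRange m n).flatMap (fun i => if i < m then F i else []) = [] := by
      apply List.flatMap_eq_nil_iff.mpr
      intro i hi
      have := PySem.List.mem_pyRange_one.mp hi
      simp [not_lt.mpr this.1]
    rw [hA, hB, List.append_nil]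
  · rw [PySem.List.pyRange_one_eq_nil (show m ≤ 0 by omega)]
    simp only [List.flatMap_nil]
    apply List.flatMap_eq_nil_iff.mpr
    intro i hi
    have := PySem.List.mem_pyRange_one.mp hi
    simp [show ¬ (i < m) by omega]

lemma pv_projB (max_k : Int) (s : List String) (k : Int) (h1 : 1 ≤ k) (h2 : k ≤ max_k) :
    (pvLB max_k s).filter (fun p => p.1 == k) = (pvGrams s k).map (fun g => (k, g)) := by
  rw [pvLB, List.filter_flatMap]
  have hstep : ∀ i ∈ PySem.List.pyRange 0 (s.length : Int),
      ((PySem.List.pyRange i (min (i + max_k) (s.length : Int))).map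
          (fun j => (j - i + 1, pvGram s i (j + 1)))).filter (fun p => p.1 == k)
        = if i < (s.length : Int) - k + 1 then [(k, pvGram s i (i + k))] else [] := by
    intro i hi
    have hi' := PySem.List.mem_pyRange_one.mp hi
    rw [List.filter_map]
    have hpred : (PySem.List.pyRange i (min (i + max_k) (s.length : Int))).filter
          ((fun p => p.1 == k) ∘ (fun j => (j - i + 1, pvGram s i (j + 1))))
        = (PySem.List.pyRange i (min (i + max_k) (s.length : Int))).filter (fun j => j == i + k - 1) := by
      apply List.filter_congr
      intro j _
      rw [Bool.eq_iff_iff]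
      simp only [Function.comp_apply, beq_iff_eq]
      omega
    rw [hpred, pv_filter_beq_nodup _ _ (PySem.List.nodup_pyRange_one _ _)]
    by_cases hc : i < (s.length : Int) - k + 1
    · have hmem : i + k - 1 ∈ PySem.List.pyRange i (min (i + max_k) (s.length : Int)) :=
        PySem.List.mem_pyRange_one.mpr ⟨by omega, by omega⟩
      rw [if_pos hmem, if_pos hc]
      have e2 : i + k - 1 + 1 = i + k := by ring
      simp [e2]
      ring
    · have hmem : i + k - 1 ∉ PySem.List.pyRange i (min (i + max_k) (s.length : Int)) := by
        intro hmem
        have := PySem.List.mem_pyRange_one.mp hmem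
        omega
      rw [if_neg hmem, if_neg hc]
      simp
  rw [List.flatMap_congr hstep,
    pv_range_flatMap_if (s.length : Int) ((s.length : Int) - k + 1)
      (fun i => [(k, pvGram s i (i + k))]) (by omega)]
  rw [pvGrams, List.map_map]
  simp only [Function.comp_def]
  exact Eq.symm List.map_eq_flatMap

-- keys of the init dict
lemma pv_keys_init (max_k : Int) :
    ((PySem.List.pyRange 1 (max_k + 1)).foldl
        (fun d k => d.insert k (PySem.Dict.empty : PySem.Dict String Int))
        PySem.Dict.empty).keys = PySem.List.pyRange 1 (max_k + 1) := by
  rw [PySem.Dict.keys_foldl_insert]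
  simp [PySem.Set.update_nil_left,
    PySem.Set.ofList_eq_self_of_nodup _ (PySem.List.nodup_pyRange_one _ _)]

-- keys after a fold of pvStep updates whose keys all lie in the dict
lemma pv_keys_foldl_step (u : String → PySem.Dict String Int → PySem.Dict String Int)
    (l : List (Int × String)) (d : PySem.Dict Int (PySem.Dict String Int))
    (h : ∀ p ∈ l, p.1 ∈ d.keys) :
    (l.foldl (pvStep u) d).keys = d.keys := by
  have : (l.foldl (pvStep u) d).keys = PySem.Set.update d.keys (l.map (·.1)) :=
    PySem.Dict.keys_foldl_modify_key l (·.1) PySem.Dict.empty (fun _ p => u p.2) d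
  rw [this]
  apply pv_update_of_subset
  intro x hx
  obtain ⟨p, hp, rfl⟩ := List.mem_map.mp hx
  exact h p hp

-- the final dict, items form, for either side
lemma pv_items_foldl_step (u : String → PySem.Dict String Int → PySem.Dict String Int)
    (max_k : Int) (l : List (Int × String))
    (h : ∀ p ∈ l, 1 ≤ p.1 ∧ p.1 < max_k + 1) :
    (l.foldl (pvStep u)
        ((PySem.List.pyRange 1 (max_k + 1)).foldl
          (fun d k => d.insert k (PySem.Dict.empty : PySem.Dict String Int))
          PySem.Dict.empty)).items
      = (PySem.List.pyRange 1 (max_k + 1)).map (fun k =>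
          (k, ((l.filter (fun p => p.1 == k)).map (·.2)).foldl (fun b g => u g b)
                PySem.Dict.empty)) := by
  set init := (PySem.List.pyRange 1 (max_k + 1)).foldl
    (fun d k => d.insert k (PySem.Dict.empty : PySem.Dict String Int)) PySem.Dict.empty with hinit
  have hkeys : (l.foldl (pvStep u) init).keys = PySem.List.pyRange 1 (max_k + 1) := by
    rw [pv_keys_foldl_step u l init]
    · exact pv_keys_init max_k
    · intro p hp
      rw [pv_keys_init max_k]
      exact PySem.List.mem_pyRange_one.mpr (h p hp)
  have hnd : (l.foldl (pvStep u) init).keys.Nodup := by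
    rw [hkeys]; exact PySem.List.nodup_pyRange_one _ _
  rw [PySem.Dict.items_eq_map_keys _ hnd PySem.Dict.empty, hkeys]
  apply List.map_congr_left
  intro k hk
  rw [pv_getD_foldl_step u l init k]
  have : init.getD k PySem.Dict.empty = PySem.Dict.empty := by
    rw [hinit, pv_getD_foldl_insert_const]
    simp [hk]
  rw [this]

-- ===== VERDICT (by name: the statement is the Claim_ definition above) =====
theorem count_k_sequences_spec : Claim_equal_count_k_sequences := by
  intro sentences max_k _
  unfold Spec_count_k_sequences
  by_cases hmk : 1 ≤ max_k
  case neg =>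
    have hnil : PySem.List.pyRange 1 (max_k + 1) = [] :=
      PySem.List.pyRange_one_eq_nil (by omega)
    have hlt : ¬ (max_k ≥ 1) := by omega
    simp [count_k_sequences, count_k_sequences_alt, hnil, hlt]
  case pos =>
    have hA : count_k_sequences sentences max_k
        = ((sentences.flatMap (pvLA max_k)).foldl
            (pvStep (fun g b => b.modify g 0 (· + 1)))
            ((PySem.List.pyRange 1 (max_k + 1)).foldl
              (fun d k => d.insert k PySem.Dict.empty) PySem.Dict.empty)).items.map
            (fun p => (p.1, p.2.items)) := by
      simp only [count_k_sequences]
      congr 2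
      rw [← pv_foldl_foldl_flatMap]
      apply PySem.List.foldl_congr_mem
      intro acc s _
      exact pv_A_sentence max_k s acc
    have hB : count_k_sequences_alt sentences max_k
        = ((sentences.flatMap (pvLB max_k)).foldl
            (pvStep (fun g b => b.insert g (b.getD g 0 + 1)))
            ((PySem.List.pyRange 1 (max_k + 1)).foldl
              (fun d k => d.insert k PySem.Dict.empty) PySem.Dict.empty)).items.map
            (fun p => (p.1, p.2.items)) := by
      simp only [count_k_sequences_alt, if_pos (show max_k ≥ 1 from hmk)]
      congr 2
      rw [← pv_foldl_foldl_flatMap]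
      apply PySem.List.foldl_congr_mem
      intro acc s _
      rw [pvLB, ← pv_foldl_foldl_flatMap]
      apply PySem.List.foldl_congr_mem
      intro acc i hi
      have hi' := PySem.List.mem_pyRange_one.mp hi
      rw [List.foldl_map]
      exact pv_B_index max_k s i hmk hi'.1 hi'.2 acc
    have boundsA : ∀ p ∈ sentences.flatMap (pvLA max_k), 1 ≤ p.1 ∧ p.1 < max_k + 1 := by
      intro p hp
      obtain ⟨s, _, hp⟩ := List.mem_flatMap.mp hp
      rw [pvLA] at hp
      obtain ⟨kk, hkk, hp⟩ := List.mem_flatMap.mp hp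
      obtain ⟨i, _, rfl⟩ := List.mem_map.mp hp
      have := PySem.List.mem_pyRange_one.mp hkk
      exact ⟨this.1, this.2⟩
    have boundsB : ∀ p ∈ sentences.flatMap (pvLB max_k), 1 ≤ p.1 ∧ p.1 < max_k + 1 := by
      intro p hp
      obtain ⟨s, _, hp⟩ := List.mem_flatMap.mp hp
      rw [pvLB] at hp
      obtain ⟨i, hi, hp⟩ := List.mem_flatMap.mp hp
      obtain ⟨j, hj, rfl⟩ := List.mem_map.mp hp
      have h1 := PySem.List.mem_pyRange_one.mp hi
      have h2 := PySem.List.mem_pyRange_one.mp hj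
      constructor <;> simp <;> omega
    rw [hA, hB, pv_items_foldl_step _ max_k _ boundsA, pv_items_foldl_step _ max_k _ boundsB]
    congr 1
    apply List.map_congr_left
    intro k hk
    have hk' := PySem.List.mem_pyRange_one.mp hk
    have hfA : ((sentences.flatMap (pvLA max_k)).filter (fun p => p.1 == k)).map (·.2)
        = sentences.flatMap (fun s => pvGrams s k) := by
      rw [List.filter_flatMap,
        List.flatMap_congr (fun s _ => pv_projA max_k s k (by omega) (by omega)),
        List.map_flatMap]
      apply List.flatMap_congr
      intro s _
      simp
    have hfB : ((sentences.flatMap (pvLB max_k)).filter (fun p => p.1 == k)).map (·.2)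
        = sentences.flatMap (fun s => pvGrams s k) := by
      rw [List.filter_flatMap,
        List.flatMap_congr (fun s _ => pv_projB max_k s k (by omega) (by omega)),
        List.map_flatMap]
      apply List.flatMap_congr
      intro s _
      simp
    rw [hfA, hfB]
    rw [PySem.Dict.foldl_insert_getD_add_one_eq_counter, PySem.Dict.counter_eq_foldl]
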